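-- pv_equiv track=rewrite | github.com/jogamy/NAR | examples/KMA/utils/util.py | sent_to_morph_tag
-- ===== SOURCE A (Python) =====
-- def sent_to_morph_tag(tgt):
--     morph, tag = [], []
--     for tgt_split in tgt:
--         eojeols = tgt_split.split(" ")
--         morph_eojeols = []
--         tag_eojeols = []
--         for eojeol in eojeols:
--             morph_tags = eojeol.split("+")
--             morph_eojeol = []
--             tag_eojeol = []
--             for morph_tag in morph_tags:
--                 m, t = morph_tag.rsplit("/", 1)
--                 morph_eojeol.append(m)
--                 tag_eojeol.append(t)
--
--             morph_eojeols.append("+".join(morph_eojeol))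
--             tag_eojeols.append("+".join(tag_eojeol))
--
--         morph.append(" ".join(morph_eojeols))
--         tag.append(" ".join(tag_eojeols))
--
--     return morph, tag
-- ===== SOURCE B (Python) =====
-- def sent_to_morph_tag(tgt):
--     # Phase 1: fully parse into nested (morph, tag) pairs; the same ValueError
--     # fires here, at the first malformed token, left to right.
--     parsed = []
--     for sent in tgt:
--         sent_parsed = []
--         for eojeol in sent.split(" "):
--             pairs = []
--             for token in eojeol.split("+"):
--                 m, t = token.rsplit("/", 1)
--                 pairs.append((m, t))
--             sent_parsed.append(pairs)
--         parsed.append(sent_parsed)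
--     # Phase 2: two independent formatting passes over the parsed structure.
--     morph = [" ".join("+".join(p[0] for p in eoj) for eoj in sent) for sent in parsed]
--     tag = [" ".join("+".join(p[1] for p in eoj) for eoj in sent) for sent in parsed]
--     return morph, tag
-- ===== Notes on version B (the rewrite author's own statement) =====
-- stated objective: alternative
-- what changed: B separates parsing from formatting: one pass builds a nested list of (morph, tag) pairs per eojeol per sentence, then two independent formatting passes join the first and second components, instead of A's single interleaved triple loop maintaining six parallel accumulators.
import Mathlib
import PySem

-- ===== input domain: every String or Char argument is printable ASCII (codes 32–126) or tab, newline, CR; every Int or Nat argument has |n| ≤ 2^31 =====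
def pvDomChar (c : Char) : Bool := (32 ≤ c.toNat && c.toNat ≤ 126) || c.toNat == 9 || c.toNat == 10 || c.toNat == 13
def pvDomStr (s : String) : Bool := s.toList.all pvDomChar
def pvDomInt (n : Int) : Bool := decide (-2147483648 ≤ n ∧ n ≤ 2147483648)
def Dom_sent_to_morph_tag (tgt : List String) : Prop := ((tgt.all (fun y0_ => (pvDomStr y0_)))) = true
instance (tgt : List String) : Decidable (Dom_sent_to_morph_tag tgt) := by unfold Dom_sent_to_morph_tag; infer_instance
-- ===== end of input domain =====

-- B separates parsing (one pass into nested (morph, tag) pairs) from formatting (two join passes),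
-- instead of A's interleaved triple loop with six parallel accumulators; same cost, different decomposition.

-- shared primitive port of tok.rsplit("/", 1) with a two-element unpack, on code points:
-- exact when '/' occurs in tok; where Python raises ValueError (no '/'), Pre_ excludes the input.
def pvRsplit1 (cs : List Char) : List Char × List Char :=
  let i := PySem.Chars.rfind cs ['/']
  if i < 0 then (cs, [])
  else (cs.take i.toNat, cs.drop (i.toNat + 1))

-- ===== PORT A =====
-- the three loop bodies of A, innermost first (each appends to a pair of parallel accumulators)
def pvStep3 (acc3 : List (List Char) × List (List Char)) (morph_tag : List Char) :
    List (List Char) × List (List Char) :=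
  (acc3.1 ++ [(pvRsplit1 morph_tag).1], acc3.2 ++ [(pvRsplit1 morph_tag).2])

def pvStep2 (acc2 : List (List Char) × List (List Char)) (eojeol : List Char) :
    List (List Char) × List (List Char) :=
  let morph_tags := PySem.Chars.splitOn eojeol ['+']
  let inner2 := morph_tags.foldl pvStep3 ([], [])
  (acc2.1 ++ [PySem.Chars.join ['+'] inner2.1], acc2.2 ++ [PySem.Chars.join ['+'] inner2.2])

def pvStep1 (acc : List String × List String) (tgt_split : String) :
    List String × List String :=
  let eojeols := PySem.Chars.splitOn tgt_split.toList [' ']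
  let inner := eojeols.foldl pvStep2 ([], [])
  (acc.1 ++ [String.ofList (PySem.Chars.join [' '] inner.1)],
   acc.2 ++ [String.ofList (PySem.Chars.join [' '] inner.2)])

def sent_to_morph_tag (tgt : List String) : List String × List String :=
  tgt.foldl pvStep1 ([], [])

-- ===== PORT B =====
def sent_to_morph_tag_alt (tgt : List String) : List String × List String :=
  let parsed : List (List (List (List Char × List Char))) :=
    tgt.map (fun sent =>
      (PySem.Chars.splitOn sent.toList [' ']).map (fun eojeol =>
        (PySem.Chars.splitOn eojeol ['+']).map pvRsplit1))
  (parsed.map (fun sent =>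
      String.ofList (PySem.Chars.join [' '] (sent.map (fun eoj => PySem.Chars.join ['+'] (eoj.map Prod.fst))))),
   parsed.map (fun sent =>
      String.ofList (PySem.Chars.join [' '] (sent.map (fun eoj => PySem.Chars.join ['+'] (eoj.map Prod.snd))))))

-- ===== PRECONDITION & SPEC =====
-- Pre_ excludes exactly the inputs where Python A raises ValueError: a token (an eojeol split on "+")
-- containing no "/" makes the two-element unpack of rsplit("/", 1) fail. B raises there too.
def Pre_sent_to_morph_tag (tgt : List String) : Prop :=
  ∀ s ∈ tgt, ∀ e ∈ PySem.Chars.splitOn s.toList [' '],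
    ∀ tok ∈ PySem.Chars.splitOn e ['+'], PySem.Chars.isIn ['/'] tok = true
instance (tgt : List String) : Decidable (Pre_sent_to_morph_tag tgt) := by
  unfold Pre_sent_to_morph_tag; infer_instance
def pvWitness_sent_to_morph_tag : List String := ["a/X+b/Y c/Z", "q/r/T"]

def Spec_sent_to_morph_tag (tgt : List String) (out : List String × List String) : Prop := out = sent_to_morph_tag_alt tgt
instance (tgt : List String) (out : List String × List String) : Decidable (Spec_sent_to_morph_tag tgt out) := by unfold Spec_sent_to_morph_tag; infer_instance

-- ===== CLAIM (what is proved, stated in full; the proofs are below) =====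
def Claim_equal_sent_to_morph_tag : Prop := ∀ (tgt : List String), Dom_sent_to_morph_tag tgt → Pre_sent_to_morph_tag tgt → Spec_sent_to_morph_tag tgt (sent_to_morph_tag tgt)

-- ===== LEMMAS AND PROOFS =====

theorem pv_foldl3 (toks : List (List Char)) (a b : List (List Char)) :
    toks.foldl pvStep3 (a, b)
    = (a ++ toks.map (fun t => (pvRsplit1 t).1), b ++ toks.map (fun t => (pvRsplit1 t).2)) := by
  induction toks generalizing a b with
  | nil => simp
  | cons h t ih => simp [List.foldl, pvStep3, ih]

theorem pv_foldl2 (eojeols : List (List Char)) (a b : List (List Char)) :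
    eojeols.foldl pvStep2 (a, b)
    = (a ++ eojeols.map (fun e => PySem.Chars.join ['+'] ((PySem.Chars.splitOn e ['+']).map (fun t => (pvRsplit1 t).1))),
       b ++ eojeols.map (fun e => PySem.Chars.join ['+'] ((PySem.Chars.splitOn e ['+']).map (fun t => (pvRsplit1 t).2)))) := by
  induction eojeols generalizing a b with
  | nil => simp
  | cons h t ih => simp [List.foldl, pvStep2, pv_foldl3, ih]

theorem pv_foldl1 (tgt : List String) (a b : List String) :
    tgt.foldl pvStep1 (a, b)
    = (a ++ tgt.map (fun s => String.ofList (PySem.Chars.join [' ']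
          ((PySem.Chars.splitOn s.toList [' ']).map (fun e => PySem.Chars.join ['+'] ((PySem.Chars.splitOn e ['+']).map (fun t => (pvRsplit1 t).1)))))),
       b ++ tgt.map (fun s => String.ofList (PySem.Chars.join [' ']
          ((PySem.Chars.splitOn s.toList [' ']).map (fun e => PySem.Chars.join ['+'] ((PySem.Chars.splitOn e ['+']).map (fun t => (pvRsplit1 t).2))))))) := by
  induction tgt generalizing a b with
  | nil => simp
  | cons h t ih => simp [List.foldl, pvStep1, pv_foldl2, ih]

-- ===== VERDICT (by name: the statement is the Claim_ definition above) =====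
theorem sent_to_morph_tag_spec : Claim_equal_sent_to_morph_tag := by
  intro tgt _ _
  unfold Spec_sent_to_morph_tag sent_to_morph_tag sent_to_morph_tag_alt
  simp [pv_foldl1, List.map_map, Function.comp_def]
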